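-- pv_equiv track=rewrite | github.com/hamidm317/SignalProcessing_InWar_ | utlis/fourier.py | eo_indices
-- ===== SOURCE A (Python) =====
-- def eo_indices(x, odds = True, both = False):
--
--     N = len(x)
--
--     if not both:
--
--         c = 0
--
--         if odds:
--
--             c = 1
--
--         return [x[2 * e + c] for e in range(int(N / 2))]
--
--     else:
--
--         return [x[2 * e] for e in range(int(N / 2))], [x[2 * e + 1] for e in range(int(N / 2))]
-- ===== SOURCE B (Python) =====
-- def eo_indices(x, odds=True, both=False):
--     it = iter(x)
--     pairs = list(zip(it, it))  # adjacent (even, odd) pairs; a trailing lone element is dropped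
--     evens = [p[0] for p in pairs]
--     odds_l = [p[1] for p in pairs]
--     if both:
--         return evens, odds_l
--     return odds_l if odds else evens
-- ===== Notes on version B (the rewrite author's own statement) =====
-- stated objective: idiomatic
-- what changed: B replaces A's index arithmetic (x[2*e+c] over range(N//2)) by pairing adjacent elements once with zip over a shared iterator and projecting the requested component of the pair list.
-- outside the precondition, e.g. on eo_indices([1, 2, 3], True, True): A returns [[1], [2]], B returns [[1], [2]]
import Mathlib
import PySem

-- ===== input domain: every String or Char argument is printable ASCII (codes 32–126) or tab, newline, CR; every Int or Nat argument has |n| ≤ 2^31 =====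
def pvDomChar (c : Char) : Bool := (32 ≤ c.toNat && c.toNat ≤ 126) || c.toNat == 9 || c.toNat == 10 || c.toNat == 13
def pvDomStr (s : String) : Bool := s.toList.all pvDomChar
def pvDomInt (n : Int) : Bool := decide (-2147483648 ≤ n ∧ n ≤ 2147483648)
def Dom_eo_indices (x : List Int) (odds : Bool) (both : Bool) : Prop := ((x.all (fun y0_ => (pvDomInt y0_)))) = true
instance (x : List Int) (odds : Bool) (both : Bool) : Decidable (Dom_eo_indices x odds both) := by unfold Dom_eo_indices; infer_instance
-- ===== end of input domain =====

-- B replaces A's range/index arithmetic by pairing adjacent elements once and projecting the requested component (objective: idiomatic).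


-- ===== PORT A =====
-- literal port of A; for both = true the Python returns a TUPLE of two lists (not a value of
-- the declared List Int type), so that branch is excluded by Pre_ and returns a placeholder.
-- int(N / 2) = N / 2 here since N = len(x) ≥ 0 (truncating and flooring division agree).
def eo_indices (x : List Int) (odds : Bool) (both : Bool) : List Int :=
  let N : Int := PySem.List.len x
  if !both then
    let c : Int := if odds then 1 else 0
    (PySem.List.pyRange 0 (N / 2) 1).map (fun e => PySem.List.pyGetD x (2 * e + c) 0)
  else
    []

-- ===== PORT B =====
-- port of Source B's list(zip(it, it)): pair adjacent elements, dropping a trailing lone element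
def pairEO : List Int → List (Int × Int)
  | a :: b :: rest => (a, b) :: pairEO rest
  | _ => []

def eo_indices_alt (x : List Int) (odds : Bool) (both : Bool) : List Int :=
  let pairs := pairEO x
  let evens := pairs.map (fun p => p.1)
  let odds_l := pairs.map (fun p => p.2)
  if both then [] else if odds then odds_l else evens

-- ===== PRECONDITION & SPEC =====
-- Pre_ excludes both = true: there A returns a 2-tuple of lists, which is not a value of the
-- declared return type List Int.
def Pre_eo_indices (x : List Int) (odds : Bool) (both : Bool) : Prop := both = false
instance (x : List Int) (odds : Bool) (both : Bool) : Decidable (Pre_eo_indices x odds both) := by unfold Pre_eo_indices; infer_instance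
def pvWitness_eo_indices : List Int × Bool × Bool := ([1, 2, 3, 4, 5], true, false)

def Spec_eo_indices (x : List Int) (odds : Bool) (both : Bool) (out : List Int) : Prop := out = eo_indices_alt x odds both
instance (x : List Int) (odds : Bool) (both : Bool) (out : List Int) : Decidable (Spec_eo_indices x odds both out) := by unfold Spec_eo_indices; infer_instance

-- ===== CLAIM (what is proved, stated in full; the proofs are below) =====
def Claim_equal_eo_indices : Prop := ∀ (x : List Int) (odds : Bool) (both : Bool), Dom_eo_indices x odds both → Pre_eo_indices x odds both → Spec_eo_indices x odds both (eo_indices x odds both)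

-- ===== LEMMAS AND PROOFS =====

-- the comprehension [x[2k+c] for k in range(len(x)//2)] computes exactly the projections of pairEO x
theorem range_getD_eq_pairEO (x : List Int) :
    (List.range (x.length / 2)).map (fun k => x.getD (2 * k) 0) = (pairEO x).map (fun p => p.1) ∧
    (List.range (x.length / 2)).map (fun k => x.getD (2 * k + 1) 0) = (pairEO x).map (fun p => p.2) := by
  induction x using pairEO.induct with
  | case1 a b rest ih =>
    have hlen : (a :: b :: rest).length / 2 = rest.length / 2 + 1 := by
      simp [List.length_cons]; omega
    rw [hlen, List.range_succ_eq_map, List.map_cons, List.map_cons, List.map_map, List.map_map]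
    constructor
    · simp only [pairEO, List.map_cons]
      congr 1
      rw [← ih.1]
      apply List.map_congr_left
      intro k _
      have h3 : 2 * Nat.succ k = 2 * k + 1 + 1 := by omega
      simp [Function.comp, h3, List.getD_eq_getElem?_getD]
    · simp only [pairEO, List.map_cons]
      congr 1
      rw [← ih.2]
      apply List.map_congr_left
      intro k _
      have h3 : 2 * Nat.succ k = 2 * k + 1 + 1 := by omega
      simp [Function.comp, h3, List.getD_eq_getElem?_getD]
  | case2 x h =>
    cases x with
    | nil => simp [pairEO]
    | cons a t =>
      cases t with
      | nil => simp [pairEO]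
      | cons b r => exact absurd rfl (h a b r)

theorem toNat_half (n : Nat) : (((n : Int)) / 2).toNat = n / 2 := by omega

-- ===== VERDICT (by name: the statement is the Claim_ definition above) =====
theorem eo_indices_spec : Claim_equal_eo_indices := by
  intro x odds both _ hpre
  unfold Pre_eo_indices at hpre
  subst hpre
  unfold Spec_eo_indices eo_indices eo_indices_alt
  simp only [Bool.not_false, if_pos, PySem.List.len_eq, PySem.List.pyRange_one, sub_zero,
    toNat_half, List.map_map]
  have key := range_getD_eq_pairEO x
  cases odds with
  | false =>
    simp only [Bool.false_eq_true, if_false]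
    rw [← key.1]
    apply List.map_congr_left
    intro k _
    simp only [Function.comp_apply, zero_add, add_zero]
    have h2 : (2 : Int) * (k : Int) = ((2 * k : Nat) : Int) := by push_cast; ring
    rw [h2, PySem.List.pyGetD_natCast]
  | true =>
    simp only [ite_true]
    rw [← key.2]
    apply List.map_congr_left
    intro k _
    simp only [Function.comp_apply, zero_add]
    have h2 : (2 : Int) * (k : Int) + 1 = ((2 * k + 1 : Nat) : Int) := by push_cast; ring
    rw [h2, PySem.List.pyGetD_natCast]
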